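-- pv_equiv track=rewrite | github.com/philarevalo/PopCOGenT | src/PopCOGenT/length_bias_functions.py | filter_string
-- ===== SOURCE A (Python) =====
-- from itertools import combinations, groupby
--
-- def filter_string(S):
--     groups = groupby(S)
--     result = [(label, sum(1 for _ in group)) for label, group in groups]
--     begin = 0
--     filter_intervals = []
--     for base, count in result:
--         end = begin + count
--         if base == '-' and count >= 2:
--             filter_intervals.append((end, begin))
--         begin += count
--     return(filter_intervals)
-- ===== SOURCE B (Python) =====
-- import re
--
-- def filter_string(S):
--     return [(m.end(), m.start()) for m in re.finditer(r'-{2,}', S)]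
-- ===== Notes on version B (the rewrite author's own statement) =====
-- stated objective: idiomatic
-- what changed: Replaces the groupby run-length list plus offset-accumulating second loop with a single regex pass (re.finditer r'-{2,}') over the maximal dash runs.
import Mathlib
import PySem

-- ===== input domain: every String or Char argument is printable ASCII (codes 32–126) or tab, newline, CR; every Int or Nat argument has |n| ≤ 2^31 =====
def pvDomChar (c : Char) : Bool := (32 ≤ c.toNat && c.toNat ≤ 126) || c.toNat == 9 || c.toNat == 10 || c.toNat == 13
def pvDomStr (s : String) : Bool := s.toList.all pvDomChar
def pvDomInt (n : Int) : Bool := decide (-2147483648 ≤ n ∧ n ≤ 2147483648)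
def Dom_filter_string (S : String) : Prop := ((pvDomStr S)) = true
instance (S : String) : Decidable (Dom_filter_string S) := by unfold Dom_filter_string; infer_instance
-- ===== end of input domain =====

-- B replaces A's groupby run-length list plus offset-accumulating second loop with one regex-style
-- pass over the maximal dash runs (re.finditer r'-{2,}'); idiomatic rewrite, same return value.

-- ===== PORT A =====
-- itertools.groupby(S) + the length-counting comprehension: the maximal runs as (label, count).
def pvGroupby : List Char → List (Char × Nat)
  | [] => []
  | c :: cs =>
      let run := cs.takeWhile (· = c)
      (c, run.length + 1) :: pvGroupby (cs.drop run.length)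
termination_by l => l.length
decreasing_by simp

-- A's second loop: begin/end accumulation over the (base, count) list.
def pvLoopA : List (Char × Nat) → Int → List (Int × Int)
  | [], _ => []
  | (base, count) :: rest, begin_ =>
      let end_ : Int := begin_ + (count : Int)
      (if base = '-' ∧ count ≥ 2 then [(end_, begin_)] else []) ++ pvLoopA rest end_

def filter_string (S : String) : List (Int × Int) :=
  pvLoopA (pvGroupby S.toList) 0

-- ===== PORT B =====
-- re.finditer(r'-{2,}', S): scan left to right; at a '-' take the maximal (greedy) dash run,
-- yield (m.end(), m.start()) when the run has length ≥ 2, and resume after the run — a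
-- step-for-step port of the regex engine's leftmost, maximal matching for this pattern.
def pvScanB : List Char → Int → List (Int × Int)
  | [], _ => []
  | c :: cs, i =>
      if c = '-' then
        let run := cs.takeWhile (· = '-')
        let k : Nat := run.length + 1
        (if k ≥ 2 then [(i + (k : Int), i)] else []) ++ pvScanB (cs.drop run.length) (i + (k : Int))
      else
        pvScanB cs (i + 1)
termination_by l _ => l.length
decreasing_by all_goals simp

def filter_string_alt (S : String) : List (Int × Int) :=
  pvScanB S.toList 0

-- ===== PRECONDITION & SPEC =====
def Spec_filter_string (S : String) (out : List (Int × Int)) : Prop := out = filter_string_alt S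
instance (S : String) (out : List (Int × Int)) : Decidable (Spec_filter_string S out) := by unfold Spec_filter_string; infer_instance

-- ===== CLAIM (what is proved, stated in full; the proofs are below) =====
def Claim_equal_filter_string : Prop := ∀ (S : String), Dom_filter_string S → Spec_filter_string S (filter_string S)

-- ===== LEMMAS AND PROOFS =====

-- Skipping a run of a non-dash character one step at a time (B) equals skipping it in one go (A's group).
lemma scanB_skip (c : Char) (hc : ¬ c = '-') :
    ∀ (cs : List Char) (i : Int),
      pvScanB (c :: cs) i
        = pvScanB (cs.drop (cs.takeWhile (· = c)).length)
            (i + ((cs.takeWhile (· = c)).length + 1 : Nat)) := by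
  intro cs
  induction cs with
  | nil => intro i; simp [pvScanB, hc]
  | cons d ds ih =>
      intro i
      by_cases hd : d = c
      · subst hd
        have h1 : pvScanB (d :: d :: ds) i = pvScanB (d :: ds) (i + 1) := by
          simp [pvScanB, hc]
        rw [h1, ih (i + 1)]
        have ht : List.takeWhile (fun x => decide (x = d)) (d :: ds)
            = d :: List.takeWhile (fun x => decide (x = d)) ds := by simp
        rw [ht]
        simp only [List.length_cons, List.drop_succ_cons]
        congr 1
        push_cast
        ring
      · have h1 : pvScanB (c :: d :: ds) i = pvScanB (d :: ds) (i + 1) := by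
          simp [pvScanB, hc]
        rw [h1]
        simp [List.takeWhile, hd]

-- Main invariant: B's scan computes exactly A's loop over the groupby run-length list, for every offset.
lemma scanB_eq_loopA : ∀ (l : List Char) (i : Int),
    pvScanB l i = pvLoopA (pvGroupby l) i := by
  intro l
  induction l using pvGroupby.induct with
  | case1 => intro i; simp [pvScanB, pvGroupby, pvLoopA]
  | case2 c cs run ih =>
      intro i
      by_cases hc : c = '-'
      · subst hc
        simp only [pvScanB, pvGroupby, pvLoopA]
        rw [ih]
        by_cases hk : (cs.takeWhile (· = '-')).length + 1 ≥ 2 <;> simp [hk] <;> rfl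
      · rw [scanB_skip c hc]
        simp only [pvGroupby, pvLoopA]
        rw [ih]
        simp [hc]
        rfl

-- ===== VERDICT (by name: the statement is the Claim_ definition above) =====
theorem filter_string_spec : Claim_equal_filter_string := by
  intro S _
  unfold Spec_filter_string filter_string filter_string_alt
  exact (scanB_eq_loopA S.toList 0).symm
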